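-- pv_equiv track=rewrite | github.com/yuta519/code_practice | count_items.py | cntitems
-- ===== SOURCE A (Python) =====
-- def cntitems(items: str, startIndices: list[int], endIndices: list[int]) -> list[int]:
--     pipe_idx: list[int] = []
--     answers = []
--     for idx, item in enumerate(items):
--         if item == "|":
--             pipe_idx.append(idx)
--
--     if len(pipe_idx) <= 1:
--         return [0] * len(startIndices)
--
--     for i in range(0, len(startIndices)):
--         array: list[int] = [i for i in range(startIndices[i]-1, endIndices[i]-1)]
--         count_stars: int = 0
--         for idx in range(0, len(pipe_idx)-1):
--             start_idx = pipe_idx[idx] if pipe_idx[idx] in array else None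
--             end_idx = pipe_idx[idx+1] if pipe_idx[idx+1] in array else None
--             if start_idx is not None and end_idx is not None:
--                 count_stars += len(array[array.index(start_idx)+1:array.index(end_idx)])
--         answers.append(count_stars)
--     return answers
-- ===== SOURCE B (Python) =====
-- def _lb(a, x):
--     # first index j with a[j] >= x  (hand-rolled bisect_left; a sorted ascending)
--     lo, hi = 0, len(a)
--     while lo < hi:
--         mid = (lo + hi) // 2
--         if a[mid] < x:
--             lo = mid + 1
--         else:
--             hi = mid
--     return lo
--
--
-- def cntitems(items, startIndices, endIndices):
--     pipes = [i for i, c in enumerate(items) if c == "|"]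
--     if len(pipes) <= 1:
--         return [0] * len(startIndices)
--     answers = []
--     for i in range(len(startIndices)):
--         lo = startIndices[i] - 1
--         hi = endIndices[i] - 2  # inclusive upper end of A's range
--         j = _lb(pipes, lo)            # first pipe position >= lo
--         k = _lb(pipes, hi + 1) - 1    # last pipe position <= hi
--         if k - j >= 1:
--             answers.append(pipes[k] - pipes[j] - (k - j))
--         else:
--             answers.append(0)
--     return answers
-- ===== Notes on version B (the rewrite author's own statement) =====
-- stated objective: alternative
-- what changed: Instead of materializing each query's index range and scanning all adjacent pipe pairs with linear membership tests and list.index calls, B binary-searches the sorted pipe-position list for the first and last pipe inside the query window and returns the telescoped closed-form count pipes[k]-pipes[j]-(k-j).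
import Mathlib
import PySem

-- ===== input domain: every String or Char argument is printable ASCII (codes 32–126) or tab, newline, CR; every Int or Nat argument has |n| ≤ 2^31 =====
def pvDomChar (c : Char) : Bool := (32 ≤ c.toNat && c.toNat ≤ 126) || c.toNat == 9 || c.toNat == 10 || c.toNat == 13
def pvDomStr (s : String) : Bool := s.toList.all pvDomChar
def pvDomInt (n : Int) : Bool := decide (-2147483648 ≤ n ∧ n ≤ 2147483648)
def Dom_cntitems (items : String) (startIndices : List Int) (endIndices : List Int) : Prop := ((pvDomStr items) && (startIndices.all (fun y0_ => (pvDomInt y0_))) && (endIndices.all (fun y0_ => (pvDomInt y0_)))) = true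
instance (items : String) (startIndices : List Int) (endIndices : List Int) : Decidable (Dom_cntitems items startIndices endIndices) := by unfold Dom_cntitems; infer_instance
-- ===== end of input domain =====

-- B replaces A's per-query scan of a materialized index range (with linear membership
-- tests and list.index calls) by binary search over the sorted pipe positions and a
-- telescoped closed formula per query (objective: alternative algorithm).
-- ===== PORT A =====
def cntitems (items : String) (startIndices : List Int) (endIndices : List Int) : List Int :=
  let pipe_idx : List Int :=
    (PySem.List.enumerate items.toList 0).foldl
      (fun acc p => if p.2 == '|' then acc ++ [p.1] else acc) []
  if pipe_idx.length ≤ 1 then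
    List.replicate startIndices.length 0
  else
    (PySem.List.pyRange 0 (startIndices.length : Int) 1).foldl (fun answers i =>
      let array : List Int :=
        PySem.List.pyRange (PySem.List.pyGetD startIndices i 0 - 1)
                           (PySem.List.pyGetD endIndices i 0 - 1) 1
      let count_stars : Int :=
        (PySem.List.pyRange 0 ((pipe_idx.length : Int) - 1) 1).foldl (fun c idx =>
          let start_idx : Option Int :=
            if PySem.List.pyGetD pipe_idx idx 0 ∈ array then some (PySem.List.pyGetD pipe_idx idx 0) else none
          let end_idx : Option Int :=
            if PySem.List.pyGetD pipe_idx (idx + 1) 0 ∈ array then some (PySem.List.pyGetD pipe_idx (idx + 1) 0) else none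
          match start_idx, end_idx with
          | some sp, some ep =>
              c + ((PySem.List.slice array
                      (some ((((PySem.List.index? array sp).getD 0 : Nat) : Int) + 1))
                      (some (((PySem.List.index? array ep).getD 0 : Nat) : Int))).length : Int)
          | _, _ => c) 0
      answers ++ [count_stars]) []

-- ===== PORT B =====
-- binary search: first index j in [lo, hi) with a[j] >= x (hand-rolled bisect_left from Source B)
def lbAux (a : List Int) (x : Int) (lo hi : Nat) : Nat :=
  if _h : lo < hi then
    let mid := (lo + hi) / 2
    if a.getD mid 0 < x then lbAux a x (mid + 1) hi else lbAux a x lo mid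
  else lo
termination_by hi - lo
decreasing_by all_goals omega

def cntitems_alt (items : String) (startIndices : List Int) (endIndices : List Int) : List Int :=
  let pipes : List Int :=
    ((PySem.List.enumerate items.toList 0).filter (fun p => p.2 == '|')).map (fun p => p.1)
  if pipes.length ≤ 1 then
    List.replicate startIndices.length 0
  else
    (PySem.List.pyRange 0 (startIndices.length : Int) 1).foldl (fun answers i =>
      let lo := PySem.List.pyGetD startIndices i 0 - 1
      let hi := PySem.List.pyGetD endIndices i 0 - 2
      let j : Nat := lbAux pipes lo 0 pipes.length
      let k : Int := (lbAux pipes (hi + 1) 0 pipes.length : Int) - 1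
      let ans : Int :=
        if 1 ≤ k - j then pipes.getD k.toNat 0 - pipes.getD j 0 - (k - j) else 0
      answers ++ [ans]) []

-- ===== PRECONDITION & SPEC =====
-- Pre_ excludes exactly the inputs where A raises IndexError: endIndices shorter than
-- startIndices while the string has at least two pipes (B raises there too).
def Pre_cntitems (items : String) (startIndices : List Int) (endIndices : List Int) : Prop :=
  items.toList.countP (fun c => c == '|') ≤ 1 ∨ startIndices.length ≤ endIndices.length
instance (items : String) (startIndices : List Int) (endIndices : List Int) : Decidable (Pre_cntitems items startIndices endIndices) := by unfold Pre_cntitems; infer_instance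

def pvWitness_cntitems : String × List Int × List Int := ("*|**|*", [1], [7])

def Spec_cntitems (items : String) (startIndices : List Int) (endIndices : List Int) (out : List Int) : Prop := out = cntitems_alt items startIndices endIndices
instance (items : String) (startIndices : List Int) (endIndices : List Int) (out : List Int) : Decidable (Spec_cntitems items startIndices endIndices out) := by unfold Spec_cntitems; infer_instance

-- ===== CLAIM (what is proved, stated in full; the proofs are below) =====
def Claim_equal_cntitems : Prop := ∀ (items : String) (startIndices : List Int) (endIndices : List Int), Dom_cntitems items startIndices endIndices → Pre_cntitems items startIndices endIndices → Spec_cntitems items startIndices endIndices (cntitems items startIndices endIndices)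

-- ===== LEMMAS AND PROOFS =====

-- number of elements < x in a list (what bisect_left finds on a sorted list)
def rank (x : Int) (ps : List Int) : Nat := ps.countP (fun p => decide (p < x))

theorem rank_le_length (x : Int) (ps : List Int) : rank x ps ≤ ps.length :=
  List.countP_le_length

theorem rank_iff (x : Int) (ps : List Int) (hs : ps.Pairwise (· < ·))
    (t : Nat) (ht : t < ps.length) : ps[t] < x ↔ t < rank x ps := by
  induction ps generalizing t with
  | nil => simp at ht
  | cons a l ih =>
    rcases List.pairwise_cons.mp hs with ⟨ha, hl⟩
    by_cases hax : a < x
    · cases t with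
      | zero => simp [rank, hax]
      | succ t =>
        simp only [List.getElem_cons_succ]
        rw [ih hl t (by simpa using ht), rank, rank, List.countP_cons]
        simp [hax]
    · have hz : l.countP (fun p => decide (p < x)) = 0 := by
        rw [List.countP_eq_zero]
        intro p hp
        simp only [decide_eq_true_eq]
        intro hpx
        exact hax (lt_trans (ha p hp) hpx)
      have : rank x (a :: l) = 0 := by
        simp [rank, hax, hz]
      rw [this]
      simp only [Nat.not_lt_zero, iff_false]
      cases t with
      | zero => simpa using hax
      | succ t =>
        simp only [List.getElem_cons_succ]
        intro hpx
        exact hax (lt_trans (ha _ (List.getElem_mem _)) hpx)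

theorem lb_eq (ps : List Int) (x : Int) (hs : ps.Pairwise (· < ·)) :
    ∀ n lo hi, hi - lo ≤ n → lo ≤ rank x ps → rank x ps ≤ hi → hi ≤ ps.length →
      lbAux ps x lo hi = rank x ps := by
  intro n
  induction n with
  | zero =>
    intro lo hi h1 h2 h3 _
    rw [lbAux]
    simp only [show ¬ lo < hi by omega, dif_neg, not_false_iff]
    omega
  | succ n ih =>
    intro lo hi h1 h2 h3 h4
    rw [lbAux]
    by_cases hlt : lo < hi
    · simp only [dif_pos hlt]
      have hmid : (lo + hi) / 2 < ps.length := by omega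
      have hg : ps.getD ((lo + hi) / 2) 0 = ps[(lo + hi) / 2] := List.getD_eq_getElem _ _ hmid
      by_cases hc : ps.getD ((lo + hi) / 2) 0 < x
      · simp only [if_pos hc]
        have : (lo + hi) / 2 < rank x ps := (rank_iff x ps hs _ hmid).mp (hg ▸ hc)
        exact ih _ _ (by omega) (by omega) h3 h4
      · simp only [if_neg hc]
        have : ¬ (lo + hi) / 2 < rank x ps := fun h => hc (hg ▸ ((rank_iff x ps hs _ hmid).mpr h))
        exact ih _ _ (by omega) h2 (by omega) (by omega)
    · simp only [dif_neg hlt]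
      omega

theorem index?_pyRange_one (a b x : Int) (h1 : a ≤ x) (h2 : x < b) :
    PySem.List.index? (PySem.List.pyRange a b 1) x = some (x - a).toNat := by
  have hn : ((b - a).toNat) = (b - a) := by omega
  induction hx : (x - a).toNat generalizing a with
  | zero =>
    have hxa : x = a := by omega
    rw [PySem.List.pyRange_one_cons (by omega), hxa]
    exact PySem.List.index?_cons_self a _
  | succ n ih =>
    rw [PySem.List.pyRange_one_cons (by omega)]
    rw [PySem.List.index?_cons_of_ne _ (show a ≠ x by omega)]
    rw [ih (a + 1) (by omega) (by omega) (by omega)]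
    simp

theorem slice_len_pyRange (a b p q : Int) (hp : a ≤ p) (hpq : p < q) (hq : q < b) :
    ((PySem.List.slice (PySem.List.pyRange a b 1)
        (some ((((PySem.List.index? (PySem.List.pyRange a b 1) p).getD 0 : Nat) : Int) + 1))
        (some (((PySem.List.index? (PySem.List.pyRange a b 1) q).getD 0 : Nat) : Int))).length : Int)
      = q - p - 1 := by
  rw [index?_pyRange_one a b p hp (by omega), index?_pyRange_one a b q (by omega) hq]
  simp only [Option.getD_some]
  rw [show (((p - a).toNat : Int) + 1) = (((p - a).toNat + 1 : Nat) : Int) by push_cast; ring]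
  rw [PySem.List.slice_natCast]
  simp only [List.length_take, List.length_drop, PySem.List.length_pyRange_one]
  omega

theorem tele (g : Nat → Int) (j b : Nat) :
    ∀ n, ((List.range n).map (fun t => if j ≤ t ∧ t + 1 ≤ b then g (t + 1) - g t else 0)).sum
      = if j + 1 ≤ min b n then g (min b n) - g j else 0 := by
  intro n
  induction n with
  | zero => simp
  | succ n ih =>
    rw [List.range_succ, List.map_append, List.sum_append, ih]
    by_cases hb : b ≤ n
    · have h1 : min b (n + 1) = min b n := by omega
      have h2 : ¬ (j ≤ n ∧ n + 1 ≤ b) := by omega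
      simp only [h1, h2, if_false, List.map_cons, List.map_nil, List.sum_cons, List.sum_nil]
      simp
    · have h1 : min b (n + 1) = n + 1 := by omega
      have h2 : min b n = n := by omega
      rw [h1, h2] at *
      by_cases hj : j ≤ n
      · by_cases hjn : j + 1 ≤ n
        · simp only [if_pos hjn, if_pos (by omega : j ≤ n ∧ n + 1 ≤ b), List.map_cons,
            List.map_nil, List.sum_cons, List.sum_nil, if_pos (by omega : j + 1 ≤ n + 1)]
          ring
        · have hjn' : j = n := by omega
          subst hjn'
          simp only [List.map_cons, List.map_nil, List.sum_cons, List.sum_nil]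
          split_ifs <;> first | (exfalso; omega) | ring
      · have e1 : ¬ (j ≤ n ∧ n + 1 ≤ b) := by omega
        have e2 : ¬ j + 1 ≤ n := by omega
        have e3 : ¬ j + 1 ≤ n + 1 := by omega
        simp only [List.map_cons, List.map_nil, List.sum_cons, List.sum_nil, if_neg e1,
          if_neg e2, if_neg e3]
        ring

theorem lbAux_rank (ps : List Int) (x : Int) (hs : ps.Pairwise (· < ·)) :
    lbAux ps x 0 ps.length = rank x ps :=
  lb_eq ps x hs ps.length 0 ps.length (by omega) (by omega) (rank_le_length x ps) le_rfl

theorem perQuery (ps : List Int) (hs : ps.Pairwise (· < ·)) (hm : ¬ ps.length ≤ 1) (s e : Int) :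
    ((PySem.List.pyRange 0 ((ps.length : Int) - 1) 1).foldl (fun c idx =>
        let start_idx : Option Int :=
          if PySem.List.pyGetD ps idx 0 ∈ PySem.List.pyRange (s - 1) (e - 1) 1 then some (PySem.List.pyGetD ps idx 0) else none
        let end_idx : Option Int :=
          if PySem.List.pyGetD ps (idx + 1) 0 ∈ PySem.List.pyRange (s - 1) (e - 1) 1 then some (PySem.List.pyGetD ps (idx + 1) 0) else none
        match start_idx, end_idx with
        | some sp, some ep =>
            c + ((PySem.List.slice (PySem.List.pyRange (s - 1) (e - 1) 1)
                    (some ((((PySem.List.index? (PySem.List.pyRange (s - 1) (e - 1) 1) sp).getD 0 : Nat) : Int) + 1))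
                    (some (((PySem.List.index? (PySem.List.pyRange (s - 1) (e - 1) 1) ep).getD 0 : Nat) : Int))).length : Int)
        | _, _ => c) 0)
    = (if 1 ≤ ((lbAux ps (e - 2 + 1) 0 ps.length : Int) - 1) - (lbAux ps (s - 1) 0 ps.length : Nat)
       then ps.getD (((lbAux ps (e - 2 + 1) 0 ps.length : Int) - 1)).toNat 0 - ps.getD (lbAux ps (s - 1) 0 ps.length) 0
            - (((lbAux ps (e - 2 + 1) 0 ps.length : Int) - 1) - (lbAux ps (s - 1) 0 ps.length : Nat))
       else 0) := by
  have hadj : ∀ (t : Nat) (ht : t + 1 < ps.length), ps[t]'(by omega) < ps[t + 1]'(ht) := by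
    intro t ht
    exact (List.pairwise_iff_getElem.mp hs) t (t + 1) (by omega) ht (by omega)
  set j := rank (s - 1) ps with hj
  set k' := rank (e - 1) ps with hk'
  have hjm : j ≤ ps.length := rank_le_length _ _
  have hkm : k' ≤ ps.length := rank_le_length _ _
  rw [lbAux_rank ps (s - 1) hs, show (e - 2 + 1) = e - 1 by ring, lbAux_rank ps (e - 1) hs]
  trans ((PySem.List.pyRange 0 ((ps.length : Int) - 1) 1).foldl (fun (c : Int) (idx : Int) =>
      c + (if PySem.List.pyGetD ps idx 0 ∈ PySem.List.pyRange (s - 1) (e - 1) 1 ∧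
              PySem.List.pyGetD ps (idx + 1) 0 ∈ PySem.List.pyRange (s - 1) (e - 1) 1
           then PySem.List.pyGetD ps (idx + 1) 0 - PySem.List.pyGetD ps idx 0 - 1 else 0)) 0)
  · apply PySem.List.foldl_congr_mem'
    intro idx hidx c
    beta_reduce
    rw [PySem.List.mem_pyRange_one] at hidx
    by_cases h1 : PySem.List.pyGetD ps idx 0 ∈ PySem.List.pyRange (s - 1) (e - 1) 1
    · by_cases h2 : PySem.List.pyGetD ps (idx + 1) 0 ∈ PySem.List.pyRange (s - 1) (e - 1) 1
      · simp only [if_pos h1, if_pos h2, if_pos (And.intro h1 h2)]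
        have hm1 : PySem.List.pyGetD ps idx 0 < PySem.List.pyGetD ps (idx + 1) 0 := by
          have h3 : idx.toNat + 1 < ps.length := by omega
          have e1 : idx = (idx.toNat : Int) := by omega
          rw [e1, show ((idx.toNat : Int) + 1) = ((idx.toNat + 1 : Nat) : Int) by push_cast; ring,
            PySem.List.pyGetD_natCast, PySem.List.pyGetD_natCast,
            List.getD_eq_getElem _ _ (by omega : idx.toNat < ps.length),
            List.getD_eq_getElem _ _ h3]
          exact hadj idx.toNat h3
        rw [PySem.List.mem_pyRange_one] at h1 h2
        rw [slice_len_pyRange (s - 1) (e - 1) _ _ h1.1 hm1 h2.2]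
      · rw [if_pos h1, if_neg h2, if_neg (fun hc => h2 (And.right hc))]
        show c = c + 0
        omega
    · rw [if_neg h1, if_neg (fun hc => h1 (And.left hc))]
      by_cases h2 : PySem.List.pyGetD ps (idx + 1) 0 ∈ PySem.List.pyRange (s - 1) (e - 1) 1
      · rw [if_pos h2]
        show c = c + 0
        omega
      · rw [if_neg h2]
        show c = c + 0
        omega
  rw [PySem.List.foldl_add]
  rw [PySem.List.pyRange_one 0 ((ps.length : Int) - 1)]
  rw [List.map_map]
  have hmn : (((ps.length : Int) - 1) - 0).toNat = ps.length - 1 := by omega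
  rw [hmn]
  rw [List.map_congr_left (g := fun t : Nat =>
      if rank (s - 1) ps ≤ t ∧ t + 1 ≤ rank (e - 1) ps - 1
      then ((fun tt : Nat => ps.getD tt 0 - tt) (t + 1)) - ((fun tt : Nat => ps.getD tt 0 - tt) t)
      else 0) ?_]
  · rw [tele (fun tt : Nat => ps.getD tt 0 - tt) (rank (s - 1) ps) (rank (e - 1) ps - 1) (ps.length - 1)]
    have hminv : min (rank (e - 1) ps - 1) (ps.length - 1) = rank (e - 1) ps - 1 := by omega
    rw [hminv]
    rw [← hj, ← hk']
    split_ifs with c1 c2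
    · have hkn : (((k' : Int) - 1)).toNat = k' - 1 := by omega
      rw [hkn]
      omega
    · exfalso; omega
    · exfalso; omega
    · rfl
  · intro t hmem
    rw [List.mem_range] at hmem
    simp only [Function.comp_apply]
    have hb1 : t < ps.length := by omega
    have hb2 : t + 1 < ps.length := by omega
    rw [show ((0 : Int) + (t : Int)) = ((t : Nat) : Int) by ring]
    rw [show ((t : Int) + 1) = ((t + 1 : Nat) : Int) by push_cast; ring]
    rw [PySem.List.pyGetD_natCast, PySem.List.pyGetD_natCast]
    have d1 : ps.getD t 0 = ps[t] := List.getD_eq_getElem _ _ hb1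
    have d2 : ps.getD (t + 1) 0 = ps[t + 1] := List.getD_eq_getElem _ _ hb2
    have f1 : ps[t] < s - 1 ↔ t < rank (s - 1) ps := rank_iff _ ps hs t hb1
    have f2 : ps[t + 1] < s - 1 ↔ t + 1 < rank (s - 1) ps := rank_iff _ ps hs (t + 1) hb2
    have f3 : ps[t] < e - 1 ↔ t < rank (e - 1) ps := rank_iff _ ps hs t hb1
    have f4 : ps[t + 1] < e - 1 ↔ t + 1 < rank (e - 1) ps := rank_iff _ ps hs (t + 1) hb2
    have hlt : ps[t] < ps[t + 1] := hadj t hb2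
    rw [← hj, ← hk'] at *
    simp only [PySem.List.mem_pyRange_one, d1, d2]
    split_ifs with cA cB
    · omega
    · exfalso; omega
    · exfalso; omega
    · rfl

-- ===== VERDICT (by name: the statement is the Claim_ definition above) =====
theorem cntitems_spec : Claim_equal_cntitems := by
  intro items st en _dom _hpre
  unfold Spec_cntitems cntitems cntitems_alt
  rw [PySem.List.foldl_append_if]
  simp only [List.nil_append]
  set ps := ((PySem.List.enumerate items.toList 0).filter (fun p => p.2 == '|')).map (fun p => p.1) with hps
  have hs : ps.Pairwise (· < ·) := by
    rw [hps, List.pairwise_map]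
    exact (PySem.List.pairwise_lt_enumerate items.toList 0).filter _
  by_cases hlen : ps.length ≤ 1
  · rw [if_pos hlen, if_pos hlen]
  · rw [if_neg hlen, if_neg hlen]
    apply PySem.List.foldl_congr_mem'
    intro i hi acc
    beta_reduce
    congr 1
    exact congrArg (fun z => [z]) (perQuery ps hs hlen (PySem.List.pyGetD st i 0) (PySem.List.pyGetD en i 0))
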